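-- pv_equiv track=rewrite | github.com/loki0b/intro-programming | intro-programing/functions/221L4Q5.py | servir_refeicao
-- ===== SOURCE A (Python) =====
-- def servir_refeicao(gorjeta_atual):
--     gorjeta = gorjeta_atual
--
--     if gorjeta % 10 == 0:
--         gorjeta_coletada = 5
--
--         return gorjeta_coletada
--
--     else:
--         finished_ = False
--         while not finished_:
--             if gorjeta % 10 != 0:
--                 gorjeta += 1
--
--             else:
--                 finished_ = True
--
--         gorjeta_coletada = gorjeta - gorjeta_atual
--
--         return gorjeta_coletada
-- ===== SOURCE B (Python) =====
-- def servir_refeicao(gorjeta_atual):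
--     r = gorjeta_atual % 10
--     return 5 if r == 0 else 10 - r
-- ===== Notes on version B (the rewrite author's own statement) =====
-- stated objective: simpler
-- what changed: Replaces A's incremental while-loop scan (with a mutable finished_ flag) by a single closed-form modular-arithmetic expression.
import Mathlib
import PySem

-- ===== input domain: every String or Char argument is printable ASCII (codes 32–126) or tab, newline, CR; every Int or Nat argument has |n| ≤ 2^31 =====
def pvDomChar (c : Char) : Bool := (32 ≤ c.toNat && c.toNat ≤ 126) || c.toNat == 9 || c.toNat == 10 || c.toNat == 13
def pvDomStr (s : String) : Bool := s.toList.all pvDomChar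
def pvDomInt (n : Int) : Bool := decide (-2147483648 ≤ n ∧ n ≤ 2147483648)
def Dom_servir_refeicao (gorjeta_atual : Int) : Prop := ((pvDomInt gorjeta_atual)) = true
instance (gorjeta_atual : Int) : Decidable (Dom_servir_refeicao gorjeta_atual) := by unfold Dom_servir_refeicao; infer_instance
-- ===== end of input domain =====

-- B replaces A's while-loop scan to the next multiple of 10 by one closed-form
-- modular expression (objective: simpler).
-- ===== PORT A =====
-- the while loop: increment gorjeta until gorjeta % 10 == 0, return final gorjeta.
-- The Nat argument is a fuel bound for totality only; 10 steps always suffice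
-- (proved in servirLoopA_eq below), so the fuel never changes the result.
def servirLoopA : Nat → Int → Int
  | 0, gorjeta => gorjeta
  | fuel + 1, gorjeta =>
    if PySem.Int.mod gorjeta 10 ≠ 0 then servirLoopA fuel (gorjeta + 1)
    else gorjeta

def servir_refeicao (gorjeta_atual : Int) : Int :=
  if PySem.Int.mod gorjeta_atual 10 = 0 then 5
  else servirLoopA 10 gorjeta_atual - gorjeta_atual

-- ===== PORT B =====
def servir_refeicao_alt (gorjeta_atual : Int) : Int :=
  let r := PySem.Int.mod gorjeta_atual 10
  if r = 0 then 5 else 10 - r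

-- ===== PRECONDITION & SPEC =====
def Spec_servir_refeicao (gorjeta_atual : Int) (out : Int) : Prop := out = servir_refeicao_alt gorjeta_atual
instance (gorjeta_atual : Int) (out : Int) : Decidable (Spec_servir_refeicao gorjeta_atual out) := by unfold Spec_servir_refeicao; infer_instance

-- ===== CLAIM (what is proved, stated in full; the proofs are below) =====
def Claim_equal_servir_refeicao : Prop := ∀ (gorjeta_atual : Int), Dom_servir_refeicao gorjeta_atual → Spec_servir_refeicao gorjeta_atual (servir_refeicao gorjeta_atual)

-- ===== LEMMAS AND PROOFS =====

-- ===== VERDICT (by name: the statement is the Claim_ definition above) =====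
theorem pymod_eq_emod (a : Int) : PySem.Int.mod a 10 = a % 10 :=
  PySem.Int.mod_eq_emod_of_pos (by norm_num)

theorem servirLoopA_eq : ∀ (k : Nat) (g : Int), (10 - g % 10).toNat ≤ k →
    g % 10 ≠ 0 → servirLoopA k g = g + (10 - g % 10) := by
  intro k
  induction k with
  | zero => intro g hk _; omega
  | succ n ih =>
    intro g hk hg
    rw [servirLoopA, if_pos (by rw [pymod_eq_emod]; exact hg)]
    by_cases h2 : (g + 1) % 10 = 0
    · cases n with
      | zero => rw [servirLoopA]; omega
      | succ m =>
        rw [servirLoopA, if_neg (by rw [pymod_eq_emod]; simpa using h2)]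
        omega
    · rw [ih (g + 1) (by omega) h2]
      omega

theorem servir_refeicao_spec : Claim_equal_servir_refeicao := by
  intro g _
  unfold Spec_servir_refeicao servir_refeicao servir_refeicao_alt
  simp only [pymod_eq_emod]
  by_cases h : g % 10 = 0
  · rw [if_pos h, if_pos h]
  · rw [if_neg h, if_neg h, servirLoopA_eq 10 g (by omega) h]
    ring
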